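-- pv_equiv track=rewrite | github.com/mjoh223/phamlite | ISLAND_runner.py | find_pairs_two_lists
-- ===== SOURCE A (Python) =====
-- def find_pairs_two_lists(list1, list2, threshold):
--
--     list1 = sorted(list1)
--     list2 = sorted(list2)
--
--     pairs = []
--
--     for i in range(len(list1)):
--
--         for j in range(len(list2)):
--
--             if abs(list1[i] - list2[j]) <= threshold:
--
--                 pairs.append([list1[i], list2[j]])
--
--             elif list2[j] > list1[i]:
--
--                 break
--
--     return pairs
-- ===== SOURCE B (Python) =====
-- def find_pairs_two_lists(list1, list2, threshold):
--     # Two-pointer sweep: sort both lists; a start pointer into list2 only ever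
--     # advances across iterations, and each x emits its contiguous window
--     # [x-threshold, x+threshold] of list2.
--     s1 = sorted(list1)
--     s2 = sorted(list2)
--     m = len(s2)
--     pairs = []
--     start = 0
--     for x in s1:
--         while start < m and s2[start] < x - threshold:
--             start += 1
--         j = start
--         while j < m and s2[j] <= x + threshold:
--             pairs.append([x, s2[j]])
--             j += 1
--     return pairs
-- ===== Notes on version B (the rewrite author's own statement) =====
-- stated objective: alternative
-- what changed: Replaced the nested rescan of list2 for every element of list1 by a sorted two-pointer sweep: a start pointer into sorted list2 advances monotonically and each element of list1 emits only its contiguous threshold window; it trades the per-element rescan for output-sensitive window emission.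
import Mathlib
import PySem

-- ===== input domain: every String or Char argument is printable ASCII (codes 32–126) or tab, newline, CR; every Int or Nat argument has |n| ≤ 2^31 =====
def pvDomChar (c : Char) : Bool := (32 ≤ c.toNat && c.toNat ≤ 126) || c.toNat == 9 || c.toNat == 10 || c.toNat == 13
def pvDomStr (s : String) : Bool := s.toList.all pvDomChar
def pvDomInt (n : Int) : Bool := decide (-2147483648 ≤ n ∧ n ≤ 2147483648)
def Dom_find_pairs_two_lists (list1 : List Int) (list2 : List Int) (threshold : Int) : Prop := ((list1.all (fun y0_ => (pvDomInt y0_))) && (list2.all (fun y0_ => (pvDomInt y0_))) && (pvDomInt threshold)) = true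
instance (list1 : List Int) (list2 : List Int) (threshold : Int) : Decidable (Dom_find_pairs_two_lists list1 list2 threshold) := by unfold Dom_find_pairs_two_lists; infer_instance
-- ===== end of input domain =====

-- Alternative implementation: B replaces A's per-element rescan of list2 by a sorted two-pointer sweep (monotone start pointer + contiguous window); proved to return the same list of pairs on all inputs.


-- ===== PORT A =====
-- inner 'for j' loop of A over (the suffix of) sorted list2: append on a match,
-- break at the first element above list1[i] that is not a match
def pvInnerA (x thr : Int) : List Int → List (List Int)
  | [] => []
  | y :: ys =>
    if |x - y| ≤ thr then [x, y] :: pvInnerA x thr ys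
    else if y > x then []
    else pvInnerA x thr ys

def find_pairs_two_lists (list1 : List Int) (list2 : List Int) (threshold : Int) : List (List Int) :=
  let s1 := PySem.List.sorted list1 (fun v => v)
  let s2 := PySem.List.sorted list2 (fun v => v)
  s1.foldl (fun pairs x => pairs ++ pvInnerA x threshold s2) []

-- ===== PORT B =====
-- B's 'while start < m and s2[start] < x - threshold: start += 1', acting on the suffix
def pvDropLt (b : Int) : List Int → List Int
  | [] => []
  | y :: ys => if y < b then pvDropLt b ys else y :: ys

-- B's 'while j < m and s2[j] <= x + threshold: pairs.append([x, s2[j]]); j += 1'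
def pvEmitLe (x b : Int) : List Int → List (List Int)
  | [] => []
  | y :: ys => if y ≤ b then [x, y] :: pvEmitLe x b ys else []

def find_pairs_two_lists_alt (list1 : List Int) (list2 : List Int) (threshold : Int) : List (List Int) :=
  let s1 := PySem.List.sorted list1 (fun v => v)
  let s2 := PySem.List.sorted list2 (fun v => v)
  (s1.foldl (fun (st : List (List Int) × List Int) x =>
      let rest := pvDropLt (x - threshold) st.2
      (st.1 ++ pvEmitLe x (x + threshold) rest, rest)) ([], s2)).1

-- ===== PRECONDITION & SPEC =====
def Spec_find_pairs_two_lists (list1 : List Int) (list2 : List Int) (threshold : Int) (out : List (List Int)) : Prop := out = find_pairs_two_lists_alt list1 list2 threshold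
instance (list1 : List Int) (list2 : List Int) (threshold : Int) (out : List (List Int)) : Decidable (Spec_find_pairs_two_lists list1 list2 threshold out) := by unfold Spec_find_pairs_two_lists; infer_instance

-- ===== CLAIM (what is proved, stated in full; the proofs are below) =====
def Claim_equal_find_pairs_two_lists : Prop := ∀ (list1 : List Int) (list2 : List Int) (threshold : Int), Dom_find_pairs_two_lists list1 list2 threshold → Spec_find_pairs_two_lists list1 list2 threshold (find_pairs_two_lists list1 list2 threshold)

-- ===== LEMMAS AND PROOFS =====

-- the window of matches of x in l, in order: shared characterisation of both loops
def pvWin (x thr : Int) (l : List Int) : List (List Int) :=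
  (l.filter (fun y => decide (|x - y| ≤ thr))).map (fun y => [x, y])

theorem pvInnerA_eq (x thr : Int) (l : List Int)
    (hs : l.Pairwise (· ≤ ·)) : pvInnerA x thr l = pvWin x thr l := by
  induction l with
  | nil => rfl
  | cons y ys ih =>
    rcases List.pairwise_cons.mp hs with ⟨hy, hys⟩
    by_cases h : |x - y| ≤ thr
    · simp [pvInnerA, pvWin, h, ih hys, pvWin]
    · by_cases hgt : y > x
      · have hfilt : ys.filter (fun z => decide (|x - z| ≤ thr)) = [] := by
          rw [List.filter_eq_nil_iff]
          intro z hz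
          have hyz := hy z hz
          have hxy : thr < y - x := by
            rcases abs_cases (x - y) with ⟨he, _⟩ | ⟨he, _⟩ <;> omega
          simp only [decide_eq_true_eq]
          rcases abs_cases (x - z) with ⟨he, _⟩ | ⟨he, _⟩ <;> omega
        simp [pvInnerA, h, hgt, pvWin, hfilt]
      · simp [pvInnerA, h, hgt, ih hys, pvWin]

theorem pvEmitLe_eq (x thr : Int) (l : List Int)
    (hs : l.Pairwise (· ≤ ·)) (hlo : ∀ z ∈ l, x - thr ≤ z) :
    pvEmitLe x (x + thr) l = pvWin x thr l := by
  induction l with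
  | nil => rfl
  | cons y ys ih =>
    rcases List.pairwise_cons.mp hs with ⟨hy, hys⟩
    have hyl : x - thr ≤ y := hlo y (List.mem_cons_self)
    by_cases h : y ≤ x + thr
    · have habs : |x - y| ≤ thr := by
        rcases abs_cases (x - y) with ⟨he, _⟩ | ⟨he, _⟩ <;> omega
      simp [pvEmitLe, h, pvWin, habs,
        ih hys (fun z hz => le_trans hyl (hy z hz))]
    · have hfilt : ∀ z ∈ y :: ys, ¬ (|x - z| ≤ thr) := by
        intro z hz h'
        have hyz : y ≤ z := by
          rcases List.mem_cons.mp hz with rfl | hz'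
          · exact le_refl z
          · exact hy z hz'
        rcases abs_cases (x - z) with ⟨he, _⟩ | ⟨he, _⟩ <;> omega
      have : (y :: ys).filter (fun z => decide (|x - z| ≤ thr)) = [] := by
        rw [List.filter_eq_nil_iff]
        intro z hz
        simpa using hfilt z hz
      simp [pvEmitLe, h, pvWin, this]

theorem pvDropLt_pairwise (b : Int) (l : List Int)
    (hs : l.Pairwise (· ≤ ·)) : (pvDropLt b l).Pairwise (· ≤ ·) := by
  induction l with
  | nil => exact List.Pairwise.nil
  | cons y ys ih =>
    rcases List.pairwise_cons.mp hs with ⟨_, hys⟩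
    by_cases h : y < b
    · simpa [pvDropLt, h] using ih hys
    · simpa [pvDropLt, h] using hs

theorem pvDropLt_ge (b : Int) (l : List Int)
    (hs : l.Pairwise (· ≤ ·)) : ∀ z ∈ pvDropLt b l, b ≤ z := by
  induction l with
  | nil => intro z hz; simp [pvDropLt] at hz
  | cons y ys ih =>
    rcases List.pairwise_cons.mp hs with ⟨hy, hys⟩
    by_cases h : y < b
    · simpa [pvDropLt, h] using ih hys
    · intro z hz
      simp only [pvDropLt, if_neg h] at hz
      rcases List.mem_cons.mp hz with rfl | hz'
      · omega
      · exact le_trans (by omega) (hy z hz')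

theorem pvWin_dropLt (x thr b : Int) (l : List Int) (hb : b ≤ x - thr) :
    pvWin x thr (pvDropLt b l) = pvWin x thr l := by
  induction l with
  | nil => rfl
  | cons y ys ih =>
    by_cases h : y < b
    · have hno : ¬ (|x - y| ≤ thr) := by
        rcases abs_cases (x - y) with ⟨he, _⟩ | ⟨he, _⟩ <;> omega
      simp [pvDropLt, h, pvWin, hno] at ih ⊢
      exact ih
    · simp [pvDropLt, h]

theorem pvEmitLe_dropLt (x thr : Int) (l : List Int)
    (hs : l.Pairwise (· ≤ ·)) :
    pvEmitLe x (x + thr) (pvDropLt (x - thr) l) = pvWin x thr l := by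
  rw [pvEmitLe_eq x thr _ (pvDropLt_pairwise _ _ hs) (pvDropLt_ge _ _ hs)]
  exact pvWin_dropLt x thr _ l (le_refl _)

theorem pvFlatMap_congr {α β : Type} (l : List α) (f g : α → List β)
    (h : ∀ a ∈ l, f a = g a) : l.flatMap f = l.flatMap g := by
  induction l with
  | nil => rfl
  | cons y ys ih =>
    simp only [List.flatMap_cons, h y List.mem_cons_self,
      ih (fun a ha => h a (List.mem_cons_of_mem _ ha))]

theorem pvBloop (thr : Int) (s1 : List Int) :
    ∀ (rest : List Int) (acc : List (List Int)),
    s1.Pairwise (· ≤ ·) → rest.Pairwise (· ≤ ·) →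
    (s1.foldl (fun (st : List (List Int) × List Int) x =>
        let r := pvDropLt (x - thr) st.2
        (st.1 ++ pvEmitLe x (x + thr) r, r)) (acc, rest)).1
      = acc ++ s1.flatMap (fun x => pvWin x thr rest) := by
  induction s1 with
  | nil => intro rest acc _ _; simp
  | cons x xs ih =>
    intro rest acc hs1 hrest
    rcases List.pairwise_cons.mp hs1 with ⟨hx, hxs⟩
    simp only [List.foldl_cons, List.flatMap_cons]
    rw [ih (pvDropLt (x - thr) rest) _ hxs (pvDropLt_pairwise _ _ hrest)]
    rw [pvEmitLe_dropLt x thr rest hrest]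
    rw [pvFlatMap_congr xs _ _ (fun a ha =>
      pvWin_dropLt a thr (x - thr) rest (by have := hx a ha; omega))]
    simp

-- ===== VERDICT (by name: the statement is the Claim_ definition above) =====
theorem find_pairs_two_lists_spec : Claim_equal_find_pairs_two_lists := by
  intro list1 list2 threshold _
  unfold Spec_find_pairs_two_lists find_pairs_two_lists find_pairs_two_lists_alt
  have hs1 := PySem.List.sorted_pairwise list1 (fun v => v)
  have hs2 := PySem.List.sorted_pairwise list2 (fun v => v)
  rw [PySem.List.foldl_append_eq_flatMap, pvBloop threshold _ _ _ hs1 hs2]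
  simp only [List.nil_append]
  exact pvFlatMap_congr _ _ _ (fun a ha =>
    pvInnerA_eq a threshold _ hs2)
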